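-- pv_equiv track=rewrite | github.com/gorgitko/MI-PDD_2016 | activity/prepare_data-shared.py | split_smiles
-- ===== SOURCE A (Python) =====
-- def find_brackets(smiles):
--     """
--     Find indexes of the first matching brackets ( "(" and ")" ). It doesn't check if all brackets are valid, i.e. complete.
--
--     Parameters
--     ----------
--     smiles
--
--     Returns
--     -------
--     list
--         Index of first and second matching bracket.
--     """
--
--     indexes = []
--     n_brackets = 0
--     for i, char in enumerate(smiles):
--         if char == "(":
--             if n_brackets == 0:
--                 indexes.append(i)
--             n_brackets += 1
--         elif char == ")":
--             n_brackets -= 1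
--             if n_brackets == 0:
--                 indexes.append(i)
--                 break
--     return indexes
--
-- def split_smiles(smiles, min_len=5, join_char=""):
--     """
--     Split SMILES to three parts. The second part will be the content between first matching brackets.
--     But this content must contain >= min_len chars, so some brackets are skipped.
--     E.g. if min_len=5 and smiles="CC(C)CC(NCOOCC)CCCN(NC)", then return will be ["CC(C)CC", "NCOOCC", "CCCN(NC)"]
--     If none bracket-content is >= min_len chars, then return will be [smiles, "", ""]
--
--     Parameters
--     ----------
--     smiles
--     min_len
--     join_char
--         The character which will be appended to end, resp. beginning of splited SMILES (it should indicate that there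
--         was bracket. I.e. smiles="CC(C)CC(NCOOCC)CCCN(NC)", join_char="*" -> ["CC(C)CC*", "*NCOOCC*", "*CCCN(NC)"]
--
--     Returns
--     -------
--     str
--     """
--
--     smiles_parts_list = []
--     smiles_original = smiles
--
--     while True:
--         indexes = find_brackets(smiles)
--
--         if indexes:
--             smiles_parts = [smiles[0:indexes[0]],
--                             smiles[indexes[0]+1:indexes[1]],
--                             smiles[indexes[1]+1:]]
--             smiles_parts_list.append(smiles_parts)
--             if len(smiles_parts[1]) >= min_len:
--                 break
--             else:
--                 smiles = smiles_parts[2]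
--         else:
--             break
--
--     if indexes:
--         smiles_new = "".join(["{}({})".format(x[0], x[1]) for x in smiles_parts_list[0:-1]])
--         last_part = smiles_parts_list[-1]
--         return [smiles_new + last_part[0] + join_char, join_char + last_part[1] + join_char, join_char + last_part[2]]
--     else:
--         return [smiles_original, "", ""]
-- ===== SOURCE B (Python) =====
-- def split_smiles(smiles, min_len=5, join_char=""):
--     depth = 0
--     start = -1
--     for i, ch in enumerate(smiles):
--         if ch == "(":
--             if depth == 0:
--                 start = i
--             depth += 1
--         elif ch == ")":
--             depth -= 1
--             if depth == 0 and i - start - 1 >= min_len: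
--                 return [smiles[:start] + join_char,
--                         join_char + smiles[start + 1:i] + join_char,
--                         join_char + smiles[i + 1:]]
--     return [smiles, "", ""]
-- ===== Notes on version B (the rewrite author's own statement) =====
-- stated objective: simpler
-- what changed: A repeatedly calls find_brackets on shrinking suffix copies, accumulates per-iteration part triples and re-joins the skipped '(content)' pieces into the prefix at the end; B is one left-to-right pass over the original string maintaining a running bracket depth and candidate start index, returning slices of the original string as soon as a big-enough group closes.
import Mathlib
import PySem

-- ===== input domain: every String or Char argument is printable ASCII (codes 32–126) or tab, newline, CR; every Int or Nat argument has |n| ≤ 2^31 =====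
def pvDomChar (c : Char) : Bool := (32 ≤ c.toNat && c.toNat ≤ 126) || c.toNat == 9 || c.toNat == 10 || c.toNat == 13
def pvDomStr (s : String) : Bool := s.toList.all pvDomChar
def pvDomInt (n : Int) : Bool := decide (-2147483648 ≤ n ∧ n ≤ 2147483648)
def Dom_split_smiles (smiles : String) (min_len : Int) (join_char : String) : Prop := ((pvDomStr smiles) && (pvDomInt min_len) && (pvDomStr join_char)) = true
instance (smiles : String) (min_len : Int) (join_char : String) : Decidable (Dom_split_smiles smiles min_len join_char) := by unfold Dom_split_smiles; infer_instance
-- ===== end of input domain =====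

-- B replaces A's repeated find-first-bracket/slice/rebuild loop by a single left-to-right scan of the
-- original string with a running bracket depth, returning slices of the original (objective: simpler).


-- ===== PORT A =====
-- find_brackets: the for-loop over enumerate(smiles) with n_brackets and the growing indexes list;
-- the `break` is the non-recursive branch.
def fbGo : List Char → Int → Int → List Int → List Int
  | [], _, _, idxs => idxs
  | c :: rest, i, n, idxs =>
    if c = '(' then
      fbGo rest (i + 1) (n + 1) (if n = 0 then idxs ++ [i] else idxs)
    else if c = ')' then
      if n - 1 = 0 then idxs ++ [i]
      else fbGo rest (i + 1) (n - 1) idxs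
    else fbGo rest (i + 1) n idxs

def find_brackets (s : List Char) : List Int := fbGo s 0 0 []

-- every index fbGo adds beyond its accumulator lies in [i, i + length) — needed for aLoop's termination
lemma fbGo_ext : ∀ (s : List Char) (i n : Int) (idxs : List Int),
    ∃ ext, fbGo s i n idxs = idxs ++ ext ∧ ∀ j ∈ ext, i ≤ j ∧ j < i + s.length := by
  intro s
  induction s with
  | nil => intro i n idxs; exact ⟨[], by simp [fbGo]⟩
  | cons c rest ih =>
    intro i n idxs
    by_cases h1 : c = '('
    · by_cases h0 : n = 0
      · obtain ⟨ext, he, hb⟩ := ih (i+1) (n+1) (idxs ++ [i])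
        refine ⟨[i] ++ ext, ?_, ?_⟩
        · simp only [fbGo, if_pos h1, if_pos h0]; rw [he]; simp
        · intro j hj; rcases List.mem_append.1 hj with hj | hj
          · simp at hj; subst hj; simp
          · have := hb j hj; simp at this ⊢; omega
      · obtain ⟨ext, he, hb⟩ := ih (i+1) (n+1) idxs
        refine ⟨ext, ?_, ?_⟩
        · simp only [fbGo, if_pos h1, if_neg h0]; exact he
        · intro j hj; have := hb j hj; simp at this ⊢; omega
    · by_cases h2 : c = ')'
      · by_cases h3 : n - 1 = 0
        · refine ⟨[i], ?_, ?_⟩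
          · simp only [fbGo, if_neg h1, if_pos h2, if_pos h3]
          · intro j hj; simp at hj; subst hj; simp
        · obtain ⟨ext, he, hb⟩ := ih (i+1) (n-1) idxs
          refine ⟨ext, ?_, ?_⟩
          · simp only [fbGo, if_neg h1, if_pos h2, if_neg h3]; exact he
          · intro j hj; have := hb j hj; simp at this ⊢; omega
      · obtain ⟨ext, he, hb⟩ := ih (i+1) n idxs
        refine ⟨ext, ?_, ?_⟩
        · simp only [fbGo, if_neg h1, if_neg h2]; exact he
        · intro j hj; have := hb j hj; simp at this ⊢; omega

lemma find_brackets_bound {s : List Char} {i0 i1 : Int} {t : List Int}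
    (h : find_brackets s = i0 :: i1 :: t) : 0 ≤ i1 ∧ i1 < (s.length : Int) := by
  obtain ⟨ext, he, hb⟩ := fbGo_ext s 0 0 []
  unfold find_brackets at h
  rw [he] at h; simp at h
  have : i1 ∈ ext := by rw [h]; simp
  have := hb i1 this; omega

-- the while-True loop of split_smiles: returns the accumulated smiles_parts_list and whether the
-- final `indexes` was nonempty.  In the `[_]` case Python raises IndexError (indexes[1]); those
-- inputs are excluded by Pre_split_smiles and the value here is arbitrary.
def aLoop (s : List Char) (minLen : Int) : List (List Char × List Char × List Char) × Bool :=
  match h : find_brackets s with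
  | [] => ([], false)
  | [_] => ([], false)
  | i0 :: i1 :: _ =>
    let p0 := PySem.List.slice s (some 0) (some i0)
    let p1 := PySem.List.slice s (some (i0 + 1)) (some i1)
    let p2 := PySem.List.slice s (some (i1 + 1))
    if minLen ≤ (p1.length : Int) then ([(p0, p1, p2)], true)
    else
      let r := aLoop p2 minLen
      ((p0, p1, p2) :: r.1, r.2)
termination_by s.length
decreasing_by
  have hb := find_brackets_bound h
  rw [PySem.List.slice_from s (by omega : (0:Int) ≤ i1 + 1)]
  simp; omega

def split_smiles (smiles : String) (min_len : Int) (join_char : String) : List String :=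
  let s := smiles.toList
  let jc := join_char.toList
  let r := aLoop s min_len
  if r.2 then
    match r.1.getLast? with
    | some last =>
      let pre := r.1.dropLast.foldl (fun acc x => acc ++ (x.1 ++ '(' :: (x.2.1 ++ [')']))) []
      [String.ofList (pre ++ (last.1 ++ jc)), String.ofList (jc ++ (last.2.1 ++ jc)),
       String.ofList (jc ++ last.2.2)]
    | none => [smiles, "", ""]
  else [smiles, "", ""]

-- ===== PORT B =====
-- single scan: i/depth/start as in Source B; output built from slices of the original string.
def bGo (orig : List Char) (minLen : Int) (jc : List Char) :
    List Char → Int → Int → Int → List (List Char)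
  | [], _, _, _ => [orig, [], []]
  | c :: rest, i, depth, start =>
    if c = '(' then
      bGo orig minLen jc rest (i + 1) (depth + 1) (if depth = 0 then i else start)
    else if c = ')' then
      if depth - 1 = 0 ∧ minLen ≤ i - start - 1 then
        [PySem.List.slice orig none (some start) ++ jc,
         jc ++ (PySem.List.slice orig (some (start + 1)) (some i) ++ jc),
         jc ++ PySem.List.slice orig (some (i + 1))]
      else bGo orig minLen jc rest (i + 1) (depth - 1) start
    else bGo orig minLen jc rest (i + 1) depth start

def split_smiles_alt (smiles : String) (min_len : Int) (join_char : String) : List String :=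
  (bGo smiles.toList min_len join_char.toList smiles.toList 0 0 (-1)).map String.ofList

-- ===== PRECONDITION & SPEC =====
-- bracket-group structure of the input under find_brackets' counting: the content lengths of the
-- completed groups (in order) and the final running count (≥ 1 iff a recorded '(' is never closed).
def preScan : List Char → Int → Int → List Int → List Int × Int
  | [], d, _, acc => (acc, d)
  | c :: rest, d, cnt, acc =>
    if c = '(' then
      if d = 0 then preScan rest 1 0 acc
      else if 1 ≤ d then preScan rest (d + 1) (cnt + 1) acc
      else preScan rest (d + 1) cnt acc
    else if c = ')' then
      if d = 1 then preScan rest 0 cnt (acc ++ [cnt])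
      else if 1 ≤ d then preScan rest (d - 1) (cnt + 1) acc
      else preScan rest (d - 1) cnt acc
    else if 1 ≤ d then preScan rest d (cnt + 1) acc
    else preScan rest d cnt acc

-- Pre_ excludes exactly the inputs on which A raises IndexError (indexes[1] of a 1-element list):
-- those where the string ends inside an unmatched recorded '(' while no completed bracket group's
-- content reaches min_len.
def Pre_split_smiles (smiles : String) (min_len : Int) (join_char : String) : Prop :=
  1 ≤ (preScan smiles.toList 0 0 []).2 → ∃ l ∈ (preScan smiles.toList 0 0 []).1, min_len ≤ l

instance (smiles : String) (min_len : Int) (join_char : String) :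
    Decidable (Pre_split_smiles smiles min_len join_char) := by
  unfold Pre_split_smiles; infer_instance

def pvWitness_split_smiles : String × Int × String := ("CC(C)CC(NCOOCC)CCCN(NC)", 5, "*")

def Spec_split_smiles (smiles : String) (min_len : Int) (join_char : String) (out : List String) : Prop :=
  out = split_smiles_alt smiles min_len join_char
instance (smiles : String) (min_len : Int) (join_char : String) (out : List String) :
    Decidable (Spec_split_smiles smiles min_len join_char out) := by
  unfold Spec_split_smiles; infer_instance

-- ===== CLAIM (what is proved, stated in full; the proofs are below) =====
def Claim_equal_split_smiles : Prop := ∀ (smiles : String) (min_len : Int) (join_char : String), Dom_split_smiles smiles min_len join_char → Pre_split_smiles smiles min_len join_char → Spec_split_smiles smiles min_len join_char (split_smiles smiles min_len join_char)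

-- ===== LEMMAS AND PROOFS =====

-- A's final result computed on the List Char level
def aRes (v : List Char) (mL : Int) (jc : List Char) : List (List Char) :=
  let r := aLoop v mL
  if r.2 then
    match r.1.getLast? with
    | some last =>
      let pre := r.1.dropLast.foldl (fun acc x => acc ++ (x.1 ++ '(' :: (x.2.1 ++ [')']))) []
      [pre ++ (last.1 ++ jc), jc ++ (last.2.1 ++ jc), jc ++ last.2.2]
    | none => [v, [], []]
  else [v, [], []]

lemma split_eq_aRes (smiles : String) (mL : Int) (jc : String) :
    split_smiles smiles mL jc = (aRes smiles.toList mL jc.toList).map String.ofList := by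
  unfold split_smiles aRes
  by_cases hb : (aLoop smiles.toList mL).2 = true
  · simp only [hb, if_true]
    rcases hL : (aLoop smiles.toList mL).1.getLast? with _ | last
    · simp [String.ofList_toList]
    · simp
  · simp only [hb, if_false, Bool.false_eq_true]
    simp [String.ofList_toList]

lemma preScan_cnt : ∀ (r : List Char) (d c1 c2 : Int) (acc : List Int), d ≤ 0 →
    preScan r d c1 acc = preScan r d c2 acc := by
  intro r
  induction r with
  | nil => intro d c1 c2 acc hd; simp [preScan]
  | cons ch rest ih =>
    intro d c1 c2 acc hd
    by_cases h1 : ch = '('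
    · by_cases h0 : d = 0
      · simp only [preScan, if_pos h1, if_pos h0]
      · simp only [preScan, if_pos h1, if_neg h0, if_neg (by omega : ¬ (1:Int) ≤ d)]
        exact ih (d+1) c1 c2 acc (by omega)
    · by_cases h2 : ch = ')'
      · simp only [preScan, if_neg h1, if_pos h2, if_neg (by omega : ¬ d = 1),
          if_neg (by omega : ¬ (1:Int) ≤ d)]
        exact ih (d-1) c1 c2 acc (by omega)
      · simp only [preScan, if_neg h1, if_neg h2, if_neg (by omega : ¬ (1:Int) ≤ d)]
        exact ih d c1 c2 acc hd

lemma preScan_acc : ∀ (r : List Char) (d c : Int) (acc : List Int),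
    preScan r d c acc = (acc ++ (preScan r d c []).1, (preScan r d c []).2) := by
  intro r
  induction r with
  | nil => intro d c acc; simp [preScan]
  | cons ch rest ih =>
    intro d c acc
    by_cases h1 : ch = '('
    · by_cases h0 : d = 0
      · simp only [preScan, if_pos h1, if_pos h0]; exact ih 1 0 acc
      · by_cases hd : (1:Int) ≤ d
        · simp only [preScan, if_pos h1, if_neg h0, if_pos hd]; exact ih (d+1) (c+1) acc
        · simp only [preScan, if_pos h1, if_neg h0, if_neg hd]; exact ih (d+1) c acc
    · by_cases h2 : ch = ')'
      · by_cases hd1 : d = 1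
        · simp only [preScan, if_neg h1, if_pos h2, if_pos hd1]
          rw [ih 0 c (acc ++ [c])]
          simp [ih 0 c [c]]
        · by_cases hd : (1:Int) ≤ d
          · simp only [preScan, if_neg h1, if_pos h2, if_neg hd1, if_pos hd]; exact ih (d-1) (c+1) acc
          · simp only [preScan, if_neg h1, if_pos h2, if_neg hd1, if_neg hd]; exact ih (d-1) c acc
      · by_cases hd : (1:Int) ≤ d
        · simp only [preScan, if_neg h1, if_neg h2, if_pos hd]; exact ih d (c+1) acc
        · simp only [preScan, if_neg h1, if_neg h2, if_neg hd]; exact ih d c acc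

lemma joint2 : ∀ (r : List Char) (iF n cnt : Int) (acc : List Int) (i0 : Int), 1 ≤ n →
    (fbGo r iF n [i0] = [i0] → (preScan r n cnt acc).1 = acc ∧ 1 ≤ (preScan r n cnt acc).2) ∧
    (∀ i1 t, fbGo r iF n [i0] = i0 :: i1 :: t → t = [] ∧
      ∃ b c, r = b ++ ')' :: c ∧ (b.length : Int) = i1 - iF ∧
        preScan r n cnt acc = preScan c 0 (cnt + b.length) (acc ++ [cnt + b.length])) := by
  intro r
  induction r with
  | nil =>
    intro iF n cnt acc i0 hn
    refine ⟨fun _ => ?_, fun i1 t h => ?_⟩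
    · simp [preScan]; omega
    · simp [fbGo] at h
  | cons ch rest ih =>
    intro iF n cnt acc i0 hn
    by_cases h1 : ch = '('
    · have hfb : fbGo (ch :: rest) iF n [i0] = fbGo rest (iF+1) (n+1) [i0] := by
        simp only [fbGo, if_pos h1, if_neg (by omega : ¬ n = 0)]
      have hps : preScan (ch :: rest) n cnt acc = preScan rest (n+1) (cnt+1) acc := by
        simp only [preScan, if_pos h1, if_neg (by omega : ¬ n = 0), if_pos hn]
      rw [hfb, hps]
      obtain ⟨c1, c2⟩ := ih (iF+1) (n+1) (cnt+1) acc i0 (by omega)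
      refine ⟨c1, fun i1 t h => ?_⟩
      obtain ⟨ht, b, c, hr, hlen, hps2⟩ := c2 i1 t h
      refine ⟨ht, ch :: b, c, by rw [hr]; simp, by simp; omega, ?_⟩
      rw [hps2]
      have e1 : cnt + 1 + (b.length : Int) = cnt + ((ch :: b).length : Int) := by simp; ring
      rw [e1]
    · by_cases h2 : ch = ')'
      · by_cases h3 : n - 1 = 0
        · have hn1 : n = 1 := by omega
          subst hn1
          have hfb : fbGo (ch :: rest) iF 1 [i0] = [i0, iF] := by
            simp only [fbGo, if_neg h1, if_pos h2]; norm_num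
          refine ⟨fun h => ?_, fun i1 t h => ?_⟩
          · rw [hfb] at h; simp at h
          · rw [hfb] at h
            obtain ⟨e1, e2⟩ : iF = i1 ∧ [] = t := by simpa using h
            subst e1; subst e2
            refine ⟨rfl, [], rest, by simp [h2], by simp, ?_⟩
            simp only [preScan, if_neg h1, if_pos h2]
            norm_num
        · have hfb : fbGo (ch :: rest) iF n [i0] = fbGo rest (iF+1) (n-1) [i0] := by
            simp only [fbGo, if_neg h1, if_pos h2, if_neg h3]
          have hps : preScan (ch :: rest) n cnt acc = preScan rest (n-1) (cnt+1) acc := by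
            simp only [preScan, if_neg h1, if_pos h2, if_neg (by omega : ¬ n = 1),
              if_pos (by omega : (1:Int) ≤ n)]
          rw [hfb, hps]
          obtain ⟨c1, c2⟩ := ih (iF+1) (n-1) (cnt+1) acc i0 (by omega)
          refine ⟨c1, fun i1 t h => ?_⟩
          obtain ⟨ht, b, c, hr, hlen, hps2⟩ := c2 i1 t h
          refine ⟨ht, ch :: b, c, by rw [hr]; simp, by simp; omega, ?_⟩
          rw [hps2]
          have e1 : cnt + 1 + (b.length : Int) = cnt + ((ch :: b).length : Int) := by simp; ring
          rw [e1]
      · have hfb : fbGo (ch :: rest) iF n [i0] = fbGo rest (iF+1) n [i0] := by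
          simp only [fbGo, if_neg h1, if_neg h2]
        have hps : preScan (ch :: rest) n cnt acc = preScan rest n (cnt+1) acc := by
          simp only [preScan, if_neg h1, if_neg h2, if_pos hn]
        rw [hfb, hps]
        obtain ⟨c1, c2⟩ := ih (iF+1) n (cnt+1) acc i0 hn
        refine ⟨c1, fun i1 t h => ?_⟩
        obtain ⟨ht, b, c, hr, hlen, hps2⟩ := c2 i1 t h
        refine ⟨ht, ch :: b, c, by rw [hr]; simp, by simp; omega, ?_⟩
        rw [hps2]
        have e1 : cnt + 1 + (b.length : Int) = cnt + ((ch :: b).length : Int) := by simp; ring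
        rw [e1]

lemma joint1 : ∀ (r : List Char) (iF n cnt : Int) (acc : List Int), n ≤ 0 →
    (fbGo r iF n [] = [] → (preScan r n cnt acc).1 = acc ∧ (preScan r n cnt acc).2 ≤ 0) ∧
    (∀ i0, fbGo r iF n [] = [i0] → (preScan r n cnt acc).1 = acc ∧ 1 ≤ (preScan r n cnt acc).2) ∧
    (∀ i0 i1 t, fbGo r iF n [] = i0 :: i1 :: t → t = [] ∧
      ∃ a b c, r = a ++ '(' :: (b ++ ')' :: c) ∧ (a.length : Int) = i0 - iF ∧
        (b.length : Int) = i1 - i0 - 1 ∧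
        preScan r n cnt acc = preScan c 0 (b.length : Int) (acc ++ [(b.length : Int)])) := by
  intro r
  induction r with
  | nil =>
    intro iF n cnt acc hn
    refine ⟨fun _ => ?_, fun i0 h => by simp [fbGo] at h, fun i0 i1 t h => by simp [fbGo] at h⟩
    simp [preScan]; omega
  | cons ch rest ih =>
    intro iF n cnt acc hn
    by_cases h1 : ch = '('
    · by_cases h0 : n = 0
      · subst h0
        have hfb : fbGo (ch :: rest) iF 0 [] = fbGo rest (iF+1) 1 [iF] := by
          simp only [fbGo, if_pos h1]; norm_num
        have hps : preScan (ch :: rest) 0 cnt acc = preScan rest 1 0 acc := by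
          simp only [preScan, if_pos h1]; simp
        rw [hfb, hps]
        obtain ⟨ext, he, hbd⟩ := fbGo_ext rest (iF+1) 1 [iF]
        obtain ⟨c1, c2⟩ := joint2 rest (iF+1) 1 0 acc iF (by omega)
        refine ⟨fun h => ?_, fun i0 h => ?_, fun i0 i1 t h => ?_⟩
        · rw [he] at h; simp at h
        · have hi0 : iF = i0 := by
            have h' := h; rw [he] at h'; simpa using (congrArg (fun l => l.head?) h')
          subst hi0
          exact c1 h
        · have h' := h; rw [he] at h'
          obtain ⟨hi0, hext⟩ : iF = i0 ∧ ext = i1 :: t := by simpa using h'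
          subst hi0
          obtain ⟨ht, b, c, hr, hlen, hps2⟩ := c2 i1 t h
          refine ⟨ht, [], b, c, by simp [hr, h1], by simp only [List.length_nil, Nat.cast_zero]; omega, by omega, ?_⟩
          rw [hps2]; simp
      · have hfb : fbGo (ch :: rest) iF n [] = fbGo rest (iF+1) (n+1) [] := by
          simp only [fbGo, if_pos h1, if_neg h0]
        have hps : preScan (ch :: rest) n cnt acc = preScan rest (n+1) cnt acc := by
          simp only [preScan, if_pos h1, if_neg h0, if_neg (by omega : ¬ (1:Int) ≤ n)]
        rw [hfb, hps]
        obtain ⟨c1, c2, c3⟩ := ih (iF+1) (n+1) cnt acc (by omega)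
        refine ⟨c1, c2, fun i0 i1 t h => ?_⟩
        obtain ⟨ht, a, b, c, hr, hla, hlb, hps2⟩ := c3 i0 i1 t h
        exact ⟨ht, ch :: a, b, c, by rw [hr]; simp, by simp; omega, hlb, hps2⟩
    · by_cases h2 : ch = ')'
      · have hfb : fbGo (ch :: rest) iF n [] = fbGo rest (iF+1) (n-1) [] := by
          simp only [fbGo, if_neg h1, if_pos h2, if_neg (by omega : ¬ n - 1 = 0)]
        have hps : preScan (ch :: rest) n cnt acc = preScan rest (n-1) cnt acc := by
          simp only [preScan, if_neg h1, if_pos h2, if_neg (by omega : ¬ n = 1),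
            if_neg (by omega : ¬ (1:Int) ≤ n)]
        rw [hfb, hps]
        obtain ⟨c1, c2, c3⟩ := ih (iF+1) (n-1) cnt acc (by omega)
        refine ⟨c1, c2, fun i0 i1 t h => ?_⟩
        obtain ⟨ht, a, b, c, hr, hla, hlb, hps2⟩ := c3 i0 i1 t h
        exact ⟨ht, ch :: a, b, c, by rw [hr]; simp, by simp; omega, hlb, hps2⟩
      · have hfb : fbGo (ch :: rest) iF n [] = fbGo rest (iF+1) n [] := by
          simp only [fbGo, if_neg h1, if_neg h2]
        have hps : preScan (ch :: rest) n cnt acc = preScan rest n cnt acc := by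
          simp only [preScan, if_neg h1, if_neg h2, if_neg (by omega : ¬ (1:Int) ≤ n)]
        rw [hfb, hps]
        obtain ⟨c1, c2, c3⟩ := ih (iF+1) n cnt acc hn
        refine ⟨c1, c2, fun i0 i1 t h => ?_⟩
        obtain ⟨ht, a, b, c, hr, hla, hlb, hps2⟩ := c3 i0 i1 t h
        exact ⟨ht, ch :: a, b, c, by rw [hr]; simp, by simp; omega, hlb, hps2⟩

lemma joint4 : ∀ (r : List Char) (iF iB n i0 mL : Int) (orig jcL : List Char), 1 ≤ n →
    (fbGo r iF n [i0] = [i0] → bGo orig mL jcL r iB n (i0 - iF + iB) = [orig, [], []]) ∧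
    (∀ i1 t, fbGo r iF n [i0] = i0 :: i1 :: t →
      bGo orig mL jcL r iB n (i0 - iF + iB) =
        if mL ≤ i1 - i0 - 1 then
          [PySem.List.slice orig none (some (i0 - iF + iB)) ++ jcL,
           jcL ++ (PySem.List.slice orig (some (i0 - iF + iB + 1)) (some (i1 - iF + iB)) ++ jcL),
           jcL ++ PySem.List.slice orig (some (i1 - iF + iB + 1))]
        else bGo orig mL jcL (r.drop (i1 + 1 - iF).toNat) (i1 - iF + iB + 1) 0 (i0 - iF + iB)) := by
  intro r
  induction r with
  | nil =>
    intro iF iB n i0 mL orig jcL hn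
    exact ⟨fun _ => by simp [bGo], fun i1 t h => by simp [fbGo] at h⟩
  | cons ch rest ih =>
    intro iF iB n i0 mL orig jcL hn
    by_cases h1 : ch = '('
    · have hfb : fbGo (ch :: rest) iF n [i0] = fbGo rest (iF+1) (n+1) [i0] := by
        simp only [fbGo, if_pos h1, if_neg (by omega : ¬ n = 0)]
      have hbg : bGo orig mL jcL (ch :: rest) iB n (i0 - iF + iB)
          = bGo orig mL jcL rest (iB+1) (n+1) (i0 - (iF+1) + (iB+1)) := by
        simp only [bGo, if_pos h1, if_neg (by omega : ¬ n = 0)]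
        congr 1
        ring
      rw [hfb, hbg]
      obtain ⟨c1, c2⟩ := ih (iF+1) (iB+1) (n+1) i0 mL orig jcL (by omega)
      refine ⟨fun h => ?_, fun i1 t h => ?_⟩
      · exact c1 h
      · obtain ⟨ext, he, hbd⟩ := fbGo_ext rest (iF+1) (n+1) [i0]
        have h' := h; rw [he] at h'
        have hext : ext = i1 :: t := by simpa using h'
        have hi1 : iF + 1 ≤ i1 := (hbd i1 (by simp [hext])).1
        rw [c2 i1 t h]
        have e2 : i0 - (iF+1) + (iB+1) = i0 - iF + iB := by ring
        have e3 : i1 - (iF+1) + (iB+1) = i1 - iF + iB := by ring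
        have e5 : rest.drop (i1 + 1 - (iF+1)).toNat = (ch :: rest).drop (i1 + 1 - iF).toNat := by
          rw [(by omega : (i1 + 1 - iF).toNat = (i1 + 1 - (iF+1)).toNat + 1), List.drop_succ_cons]
        rw [e2, e3, e5]
    · by_cases h2 : ch = ')'
      · by_cases h3 : n - 1 = 0
        · have hn1 : n = 1 := by omega
          subst hn1
          have hfb : fbGo (ch :: rest) iF 1 [i0] = [i0, iF] := by
            simp only [fbGo, if_neg h1, if_pos h2]; norm_num
          refine ⟨fun h => ?_, fun i1 t h => ?_⟩
          · rw [hfb] at h; simp at h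
          · rw [hfb] at h
            obtain ⟨e1, e2⟩ : iF = i1 ∧ [] = t := by simpa using h
            subst e1; subst e2
            simp only [bGo, if_neg h1, if_pos h2]
            by_cases hml : mL ≤ iF - i0 - 1
            · rw [if_pos (⟨by norm_num, by omega⟩ :
                  (1:Int) - 1 = 0 ∧ mL ≤ iB - (i0 - iF + iB) - 1)]
              rw [if_pos hml]
              rw [(by ring : iF - iF + iB = iB)]
            · rw [if_neg (fun hc => hml (by omega : mL ≤ iF - i0 - 1))]
              rw [if_neg hml]
              rw [(by ring : iF - iF + iB = iB), (by omega : (iF + 1 - iF).toNat = 1)]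
              norm_num
        · have hfb : fbGo (ch :: rest) iF n [i0] = fbGo rest (iF+1) (n-1) [i0] := by
            simp only [fbGo, if_neg h1, if_pos h2, if_neg h3]
          have hbg : bGo orig mL jcL (ch :: rest) iB n (i0 - iF + iB)
              = bGo orig mL jcL rest (iB+1) (n-1) (i0 - (iF+1) + (iB+1)) := by
            simp only [bGo, if_neg h1, if_pos h2, if_neg (fun hc => h3 hc.1 :
              ¬ (n - 1 = 0 ∧ mL ≤ iB - (i0 - iF + iB) - 1))]
            congr 1
            ring
          rw [hfb, hbg]
          obtain ⟨c1, c2⟩ := ih (iF+1) (iB+1) (n-1) i0 mL orig jcL (by omega)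
          refine ⟨fun h => ?_, fun i1 t h => ?_⟩
          · exact c1 h
          · obtain ⟨ext, he, hbd⟩ := fbGo_ext rest (iF+1) (n-1) [i0]
            have h' := h; rw [he] at h'
            have hext : ext = i1 :: t := by simpa using h'
            have hi1 : iF + 1 ≤ i1 := (hbd i1 (by simp [hext])).1
            rw [c2 i1 t h]
            have e2 : i0 - (iF+1) + (iB+1) = i0 - iF + iB := by ring
            have e3 : i1 - (iF+1) + (iB+1) = i1 - iF + iB := by ring
            have e5 : rest.drop (i1 + 1 - (iF+1)).toNat = (ch :: rest).drop (i1 + 1 - iF).toNat := by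
              rw [(by omega : (i1 + 1 - iF).toNat = (i1 + 1 - (iF+1)).toNat + 1), List.drop_succ_cons]
            rw [e2, e3, e5]
      · have hfb : fbGo (ch :: rest) iF n [i0] = fbGo rest (iF+1) n [i0] := by
          simp only [fbGo, if_neg h1, if_neg h2]
        have hbg : bGo orig mL jcL (ch :: rest) iB n (i0 - iF + iB)
            = bGo orig mL jcL rest (iB+1) n (i0 - (iF+1) + (iB+1)) := by
          simp only [bGo, if_neg h1, if_neg h2]
          congr 1
          ring
        rw [hfb, hbg]
        obtain ⟨c1, c2⟩ := ih (iF+1) (iB+1) n i0 mL orig jcL hn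
        refine ⟨fun h => ?_, fun i1 t h => ?_⟩
        · exact c1 h
        · obtain ⟨ext, he, hbd⟩ := fbGo_ext rest (iF+1) n [i0]
          have h' := h; rw [he] at h'
          have hext : ext = i1 :: t := by simpa using h'
          have hi1 : iF + 1 ≤ i1 := (hbd i1 (by simp [hext])).1
          rw [c2 i1 t h]
          have e2 : i0 - (iF+1) + (iB+1) = i0 - iF + iB := by ring
          have e3 : i1 - (iF+1) + (iB+1) = i1 - iF + iB := by ring
          have e5 : rest.drop (i1 + 1 - (iF+1)).toNat = (ch :: rest).drop (i1 + 1 - iF).toNat := by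
            rw [(by omega : (i1 + 1 - iF).toNat = (i1 + 1 - (iF+1)).toNat + 1), List.drop_succ_cons]
          rw [e2, e3, e5]

lemma joint3 : ∀ (r : List Char) (iF iB n st mL : Int) (orig jcL : List Char), n ≤ 0 →
    (fbGo r iF n [] = [] → bGo orig mL jcL r iB n st = [orig, [], []]) ∧
    (∀ i0, fbGo r iF n [] = [i0] → bGo orig mL jcL r iB n st = [orig, [], []]) ∧
    (∀ i0 i1 t, fbGo r iF n [] = i0 :: i1 :: t →
      bGo orig mL jcL r iB n st =
        if mL ≤ i1 - i0 - 1 then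
          [PySem.List.slice orig none (some (i0 - iF + iB)) ++ jcL,
           jcL ++ (PySem.List.slice orig (some (i0 - iF + iB + 1)) (some (i1 - iF + iB)) ++ jcL),
           jcL ++ PySem.List.slice orig (some (i1 - iF + iB + 1))]
        else bGo orig mL jcL (r.drop (i1 + 1 - iF).toNat) (i1 - iF + iB + 1) 0 (i0 - iF + iB)) := by
  intro r
  induction r with
  | nil =>
    intro iF iB n st mL orig jcL hn
    exact ⟨fun _ => by simp [bGo], fun i0 h => by simp [fbGo] at h,
           fun i0 i1 t h => by simp [fbGo] at h⟩
  | cons ch rest ih =>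
    intro iF iB n st mL orig jcL hn
    by_cases h1 : ch = '('
    · by_cases h0 : n = 0
      · subst h0
        have hfb : fbGo (ch :: rest) iF 0 [] = fbGo rest (iF+1) 1 [iF] := by
          simp only [fbGo, if_pos h1]; norm_num
        have hbg : bGo orig mL jcL (ch :: rest) iB 0 st
            = bGo orig mL jcL rest (iB+1) 1 (iF - (iF+1) + (iB+1)) := by
          simp only [bGo, if_pos h1]
          norm_num
        rw [hfb, hbg]
        obtain ⟨c1, c2⟩ := joint4 rest (iF+1) (iB+1) 1 iF mL orig jcL le_rfl
        obtain ⟨ext, he, hbd⟩ := fbGo_ext rest (iF+1) 1 [iF]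
        refine ⟨fun h => ?_, fun i0 h => ?_, fun i0 i1 t h => ?_⟩
        · rw [he] at h; simp at h
        · have hi0 : iF = i0 := by
            have h' := h; rw [he] at h'
            simpa using (congrArg (fun l => l.head?) h')
          subst hi0
          exact c1 h
        · have h' := h; rw [he] at h'
          obtain ⟨hi0, hext⟩ : iF = i0 ∧ ext = i1 :: t := by simpa using h'
          subst hi0
          have hi1 : iF + 1 ≤ i1 := (hbd i1 (by simp [hext])).1
          rw [c2 i1 t h]
          have e2 : iF - (iF+1) + (iB+1) = iF - iF + iB := by ring
          have e3 : i1 - (iF+1) + (iB+1) = i1 - iF + iB := by ring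
          have e5 : rest.drop (i1 + 1 - (iF+1)).toNat = (ch :: rest).drop (i1 + 1 - iF).toNat := by
            rw [(by omega : (i1 + 1 - iF).toNat = (i1 + 1 - (iF+1)).toNat + 1), List.drop_succ_cons]
          rw [e2, e3, e5]
      · have hfb : fbGo (ch :: rest) iF n [] = fbGo rest (iF+1) (n+1) [] := by
          simp only [fbGo, if_pos h1, if_neg h0]
        have hbg : bGo orig mL jcL (ch :: rest) iB n st
            = bGo orig mL jcL rest (iB+1) (n+1) st := by
          simp only [bGo, if_pos h1, if_neg h0]
        rw [hfb, hbg]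
        obtain ⟨c1, c2, c3⟩ := ih (iF+1) (iB+1) (n+1) st mL orig jcL (by omega)
        refine ⟨c1, c2, fun i0 i1 t h => ?_⟩
        obtain ⟨ext, he, hbd⟩ := fbGo_ext rest (iF+1) (n+1) []
        have h' := h; rw [he] at h'
        have hext : ext = i0 :: i1 :: t := by simpa using h'
        have hi1 : iF + 1 ≤ i1 := (hbd i1 (by simp [hext])).1
        rw [c3 i0 i1 t h]
        have e2 : i0 - (iF+1) + (iB+1) = i0 - iF + iB := by ring
        have e3 : i1 - (iF+1) + (iB+1) = i1 - iF + iB := by ring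
        have e5 : rest.drop (i1 + 1 - (iF+1)).toNat = (ch :: rest).drop (i1 + 1 - iF).toNat := by
          rw [(by omega : (i1 + 1 - iF).toNat = (i1 + 1 - (iF+1)).toNat + 1), List.drop_succ_cons]
        rw [e2, e3, e5]
    · by_cases h2 : ch = ')'
      · have hfb : fbGo (ch :: rest) iF n [] = fbGo rest (iF+1) (n-1) [] := by
          simp only [fbGo, if_neg h1, if_pos h2, if_neg (by omega : ¬ n - 1 = 0)]
        have hbg : bGo orig mL jcL (ch :: rest) iB n st
            = bGo orig mL jcL rest (iB+1) (n-1) st := by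
          simp only [bGo, if_neg h1, if_pos h2,
            if_neg (fun hc => absurd hc.1 (by omega) :
              ¬ (n - 1 = 0 ∧ mL ≤ iB - st - 1))]
        rw [hfb, hbg]
        obtain ⟨c1, c2, c3⟩ := ih (iF+1) (iB+1) (n-1) st mL orig jcL (by omega)
        refine ⟨c1, c2, fun i0 i1 t h => ?_⟩
        obtain ⟨ext, he, hbd⟩ := fbGo_ext rest (iF+1) (n-1) []
        have h' := h; rw [he] at h'
        have hext : ext = i0 :: i1 :: t := by simpa using h'
        have hi1 : iF + 1 ≤ i1 := (hbd i1 (by simp [hext])).1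
        rw [c3 i0 i1 t h]
        have e2 : i0 - (iF+1) + (iB+1) = i0 - iF + iB := by ring
        have e3 : i1 - (iF+1) + (iB+1) = i1 - iF + iB := by ring
        have e5 : rest.drop (i1 + 1 - (iF+1)).toNat = (ch :: rest).drop (i1 + 1 - iF).toNat := by
          rw [(by omega : (i1 + 1 - iF).toNat = (i1 + 1 - (iF+1)).toNat + 1), List.drop_succ_cons]
        rw [e2, e3, e5]
      · have hfb : fbGo (ch :: rest) iF n [] = fbGo rest (iF+1) n [] := by
          simp only [fbGo, if_neg h1, if_neg h2]
        have hbg : bGo orig mL jcL (ch :: rest) iB n st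
            = bGo orig mL jcL rest (iB+1) n st := by
          simp only [bGo, if_neg h1, if_neg h2]
        rw [hfb, hbg]
        obtain ⟨c1, c2, c3⟩ := ih (iF+1) (iB+1) n st mL orig jcL hn
        refine ⟨c1, c2, fun i0 i1 t h => ?_⟩
        obtain ⟨ext, he, hbd⟩ := fbGo_ext rest (iF+1) n []
        have h' := h; rw [he] at h'
        have hext : ext = i0 :: i1 :: t := by simpa using h'
        have hi1 : iF + 1 ≤ i1 := (hbd i1 (by simp [hext])).1
        rw [c3 i0 i1 t h]
        have e2 : i0 - (iF+1) + (iB+1) = i0 - iF + iB := by ring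
        have e3 : i1 - (iF+1) + (iB+1) = i1 - iF + iB := by ring
        have e5 : rest.drop (i1 + 1 - (iF+1)).toNat = (ch :: rest).drop (i1 + 1 - iF).toNat := by
          rw [(by omega : (i1 + 1 - iF).toNat = (i1 + 1 - (iF+1)).toNat + 1), List.drop_succ_cons]
        rw [e2, e3, e5]

lemma aLoop_eq_nil {s : List Char} {mL : Int} (h : find_brackets s = []) :
    aLoop s mL = ([], false) := by
  unfold aLoop; split
  · rfl
  · rfl
  · next i0 i1 t heq => rw [h] at heq; simp at heq

lemma aLoop_eq_one {s : List Char} {mL i : Int} (h : find_brackets s = [i]) :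
    aLoop s mL = ([], false) := by
  unfold aLoop; split
  · rfl
  · rfl
  · next i0 i1 t heq => rw [h] at heq; simp at heq

lemma aLoop_eq_cons {s : List Char} {mL i0 i1 : Int} {t : List Int}
    (h : find_brackets s = i0 :: i1 :: t) :
    aLoop s mL =
      (if mL ≤ ((PySem.List.slice s (some (i0+1)) (some i1)).length : Int)
       then ([(PySem.List.slice s (some 0) (some i0), PySem.List.slice s (some (i0+1)) (some i1),
               PySem.List.slice s (some (i1+1)))], true)
       else ((PySem.List.slice s (some 0) (some i0), PySem.List.slice s (some (i0+1)) (some i1),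
              PySem.List.slice s (some (i1+1))) :: (aLoop (PySem.List.slice s (some (i1+1))) mL).1,
             (aLoop (PySem.List.slice s (some (i1+1))) mL).2)) := by
  conv_lhs => rw [aLoop]
  split
  · next heq => rw [h] at heq; simp at heq
  · next heq => rw [h] at heq; simp at heq
  · next j0 j1 u heq =>
    rw [h] at heq
    obtain ⟨e0, e1, e2⟩ : i0 = j0 ∧ i1 = j1 ∧ t = u := by simpa using heq
    subst e0; subst e1; rfl

lemma aLoop_true_ne_nil (s : List Char) (mL : Int) : (aLoop s mL).2 = true → (aLoop s mL).1 ≠ [] := by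
  rcases hf : find_brackets s with _ | ⟨i0, _ | ⟨i1, t⟩⟩
  · rw [aLoop_eq_nil hf]; simp
  · rw [aLoop_eq_one hf]; simp
  · rw [aLoop_eq_cons hf]; split <;> simp

lemma main_loop (mL : Int) (jcL : List Char) : ∀ (N : Nat) (v p : List Char) (st : Int),
    v.length ≤ N →
    (1 ≤ (preScan v 0 0 []).2 → ∃ l ∈ (preScan v 0 0 []).1, mL ≤ l) →
    ∃ x0 x1 x2, aRes v mL jcL = [x0, x1, x2] ∧
      bGo (p ++ v) mL jcL v (p.length : Int) 0 st = [p ++ x0, x1, x2] := by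
  intro N
  induction N with
  | zero =>
    intro v p st hlen _
    have hv : v = [] := by cases v with | nil => rfl | cons a l => simp at hlen
    subst hv
    exact ⟨[], [], [], by simp [aRes, aLoop_eq_nil (show find_brackets [] = [] from rfl)],
           by simp [bGo]⟩
  | succ N ihN =>
    intro v p st hlen hpre
    rcases hf : find_brackets v with _ | ⟨i0, _ | ⟨i1, t⟩⟩
    · refine ⟨v, [], [], by simp [aRes, aLoop_eq_nil hf], ?_⟩
      exact (joint3 v 0 (p.length : Int) 0 st mL (p ++ v) jcL le_rfl).1 hf
    · exfalso
      obtain ⟨hacc, hpend⟩ := (joint1 v 0 0 0 [] le_rfl).2.1 i0 hf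
      obtain ⟨l, hl, _⟩ := hpre hpend
      rw [hacc] at hl
      simp at hl
    · obtain ⟨ht, a, b, c, hv, hla, hlb, hps⟩ := (joint1 v 0 0 0 [] le_rfl).2.2 i0 i1 t hf
      subst ht
      subst hv
      have hjb := (joint3 (a ++ '(' :: (b ++ ')' :: c)) 0 (p.length : Int) 0 st mL
          (p ++ (a ++ '(' :: (b ++ ')' :: c))) jcL le_rfl).2.2 i0 i1 [] hf
      have hp0 : PySem.List.slice (a ++ '(' :: (b ++ ')' :: c)) (some 0) (some i0) = a := by
        rw [PySem.List.slice_zero_start,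
            PySem.List.slice_to _ (by omega : (0:Int) ≤ i0)]
        exact List.take_left' (by omega)
      have hp1 : PySem.List.slice (a ++ '(' :: (b ++ ')' :: c)) (some (i0 + 1)) (some i1) = b := by
        rw [show a ++ '(' :: (b ++ ')' :: c) = (a ++ ['(']) ++ (b ++ ')' :: c) from by simp,
            PySem.List.slice_toNat _ (by omega) (by omega),
            List.drop_left' (by simp; omega)]
        exact List.take_left' (by omega)
      have hp2 : PySem.List.slice (a ++ '(' :: (b ++ ')' :: c)) (some (i1 + 1)) = c := by
        rw [show a ++ '(' :: (b ++ ')' :: c) = (a ++ '(' :: (b ++ [')'])) ++ c from by simp,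
            PySem.List.slice_from _ (by omega : (0:Int) ≤ i1 + 1)]
        exact List.drop_left' (by simp; omega)
      have hq0 : PySem.List.slice (p ++ (a ++ '(' :: (b ++ ')' :: c))) none
          (some (i0 - 0 + (p.length : Int))) = p ++ a := by
        rw [PySem.List.slice_to _ (by omega),
            show p ++ (a ++ '(' :: (b ++ ')' :: c)) = (p ++ a) ++ '(' :: (b ++ ')' :: c) from by simp]
        exact List.take_left' (by simp; omega)
      have hq1 : PySem.List.slice (p ++ (a ++ '(' :: (b ++ ')' :: c)))
          (some (i0 - 0 + (p.length : Int) + 1)) (some (i1 - 0 + (p.length : Int))) = b := by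
        rw [show p ++ (a ++ '(' :: (b ++ ')' :: c)) = ((p ++ a) ++ ['(']) ++ (b ++ ')' :: c) from by simp,
            PySem.List.slice_toNat _ (by omega) (by omega),
            List.drop_left' (by simp; omega)]
        exact List.take_left' (by simp; omega)
      have hq2 : PySem.List.slice (p ++ (a ++ '(' :: (b ++ ')' :: c)))
          (some (i1 - 0 + (p.length : Int) + 1)) = c := by
        rw [show p ++ (a ++ '(' :: (b ++ ')' :: c)) = (p ++ (a ++ '(' :: (b ++ [')']))) ++ c from by simp,
            PySem.List.slice_from _ (by omega)]
        exact List.drop_left' (by simp; omega)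
      have hdrop : (a ++ '(' :: (b ++ ')' :: c)).drop (i1 + 1 - 0).toNat = c := by
        rw [show a ++ '(' :: (b ++ ')' :: c) = (a ++ '(' :: (b ++ [')'])) ++ c from by simp]
        exact List.drop_left' (by simp; omega)
      by_cases hml : mL ≤ (b.length : Int)
      · have haL : aLoop (a ++ '(' :: (b ++ ')' :: c)) mL = ([(a, b, c)], true) := by
          rw [aLoop_eq_cons hf, hp1, hp0, hp2, if_pos hml]
        refine ⟨a ++ jcL, jcL ++ (b ++ jcL), jcL ++ c, by simp [aRes, haL], ?_⟩
        rw [hjb, if_pos (by omega : mL ≤ i1 - i0 - 1), hq0, hq1, hq2]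
        simp
      · have haL : aLoop (a ++ '(' :: (b ++ ')' :: c)) mL
            = ((a, b, c) :: (aLoop c mL).1, (aLoop c mL).2) := by
          rw [aLoop_eq_cons hf, hp1, hp0, hp2, if_neg hml]
        have hps' : preScan (a ++ '(' :: (b ++ ')' :: c)) 0 0 []
            = ([(b.length : Int)] ++ (preScan c 0 0 []).1, (preScan c 0 0 []).2) := by
          rw [hps, preScan_cnt c 0 (b.length : Int) 0 _ le_rfl, preScan_acc]
          simp
        have hpre_c : 1 ≤ (preScan c 0 0 []).2 → ∃ l ∈ (preScan c 0 0 []).1, mL ≤ l := by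
          intro hp2'
          obtain ⟨l, hl, hml'⟩ := hpre (by rw [hps']; exact hp2')
          rw [hps'] at hl
          simp only [List.singleton_append, List.mem_cons] at hl
          rcases hl with hl | hl
          · exact absurd (hl ▸ hml') hml
          · exact ⟨l, hl, hml'⟩
        have hlc : c.length ≤ N := by simp at hlen; omega
        obtain ⟨y0, y1, y2, hAc, hBc⟩ :=
          ihN c (p ++ (a ++ '(' :: (b ++ [')']))) (i0 - 0 + (p.length : Int)) hlc hpre_c
        have hplen : ((p ++ (a ++ '(' :: (b ++ [')']))).length : Int)
            = i1 - 0 + (p.length : Int) + 1 := by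
          simp
          omega
        have hBside : bGo (p ++ (a ++ '(' :: (b ++ ')' :: c))) mL jcL
            (a ++ '(' :: (b ++ ')' :: c)) (p.length : Int) 0 st
            = [(p ++ (a ++ '(' :: (b ++ [')']))) ++ y0, y1, y2] := by
          rw [hjb, if_neg (by omega : ¬ mL ≤ i1 - i0 - 1), hdrop,
              show p ++ (a ++ '(' :: (b ++ ')' :: c)) = (p ++ (a ++ '(' :: (b ++ [')']))) ++ c from by simp,
              show i1 - 0 + (p.length : Int) + 1 = ((p ++ (a ++ '(' :: (b ++ [')']))).length : Int) from hplen.symm]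
          exact hBc
        cases hbz : (aLoop c mL).2 with
        | false =>
          have hAc' : aRes c mL jcL = [c, [], []] := by simp [aRes, hbz]
          rw [hAc] at hAc'
          obtain ⟨e0, e1, e2⟩ : y0 = c ∧ y1 = [] ∧ y2 = [] := by simpa using hAc'
          refine ⟨a ++ '(' :: (b ++ ')' :: c), [], [],
            by simp [aRes, haL, hbz], ?_⟩
          rw [hBside, e0, e1, e2]
          simp
        | true =>
          have hne : (aLoop c mL).1 ≠ [] := aLoop_true_ne_nil c mL hbz
          obtain ⟨q2, L', hL⟩ := List.exists_cons_of_ne_nil hne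
          rcases hl2 : (q2 :: L').getLast? with _ | last
          · simp at hl2
          · have hAc2 : aRes c mL jcL =
                [List.flatMap (fun x => x.1 ++ '(' :: (x.2.1 ++ [')'])) (q2 :: L').dropLast
                   ++ (last.1 ++ jcL),
                 jcL ++ (last.2.1 ++ jcL), jcL ++ last.2.2] := by
              simp only [aRes, hL, hbz, if_true, hl2]
              rw [PySem.List.foldl_append_eq_flatMap]
              simp
            rw [hAc] at hAc2
            obtain ⟨hy0, hy1, hy2⟩ :
                y0 = List.flatMap (fun x => x.1 ++ '(' :: (x.2.1 ++ [')'])) (q2 :: L').dropLast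
                   ++ (last.1 ++ jcL) ∧
                y1 = jcL ++ (last.2.1 ++ jcL) ∧ y2 = jcL ++ last.2.2 := by
              simpa using hAc2
            have hAv : aRes (a ++ '(' :: (b ++ ')' :: c)) mL jcL
                = [(a ++ '(' :: (b ++ [')'])) ++ y0, y1, y2] := by
              simp only [aRes, haL, hL, hbz, if_true, List.getLast?_cons_cons, hl2,
                List.dropLast_cons₂]
              rw [PySem.List.foldl_append_eq_flatMap]
              rw [hy0, hy1, hy2]
              simp
            refine ⟨(a ++ '(' :: (b ++ [')'])) ++ y0, y1, y2, hAv, ?_⟩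
            rw [hBside]
            simp

-- ===== VERDICT (by name: the statement is the Claim_ definition above) =====
theorem split_smiles_spec : Claim_equal_split_smiles := by
  intro smiles mL jc _ hpre
  unfold Spec_split_smiles
  obtain ⟨x0, x1, x2, hA, hB⟩ :=
    main_loop mL jc.toList smiles.toList.length smiles.toList [] (-1) le_rfl hpre
  rw [split_eq_aRes, hA, split_smiles_alt]
  simp only [List.nil_append, List.length_nil, Nat.cast_zero] at hB
  rw [hB]
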